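-- pv_equiv track=rewrite | github.com/u6yuvi/Algorithms | courses/algorithms/recursion/problems.py | get_distinct_subsets
-- ===== SOURCE A (Python) =====
-- def get_distinct_subsets(s):
--     """
--     Args:
--      s(str)
--     Returns:
--      list_str
--     """
--     # Write your code here.
--
--     slate = []
--     result = []
--     s = sorted(s)
--     def get_distinct_helper(arr,i,slate):
--         #base case
--         if i==len(arr):
--             result.append("".join(slate))
--             return
--
--         # recursive case
--         else:
--             cnt = 0
--             cnt = sum([1 for j in s[i:] if j==s[i]])
--             #exclude case
--             get_distinct_helper(arr,i+cnt,slate)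
--
--             #include case
--             for pick in range(1,cnt+1):
--                 slate.append(s[i])
--                 get_distinct_helper(arr,i+cnt,slate)
--             for pick in range(1,cnt+1):
--                 slate.pop()
--
--
--     get_distinct_helper(s,0,slate)
--     return result
-- ===== SOURCE B (Python) =====
-- def get_distinct_subsets(s):
--     # Iterative product over (char, count) runs of sorted(s), instead of DFS recursion.
--     runs = []
--     for c in sorted(s):
--         if runs and runs[-1][0] == c:
--             runs[-1][1] += 1
--         else:
--             runs.append([c, 1])
--     result = [""]
--     for c, cnt in runs:
--         result = [p + c * k for p in result for k in range(cnt + 1)]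
--     return result
-- ===== Notes on version B (the rewrite author's own statement) =====
-- stated objective: alternative
-- what changed: Replaced the recursive DFS over a sorted character array (exclude branch plus a pick-loop of recursive include branches with a mutated slate) by an iterative construction: build (char,count) runs of sorted(s) once, then repeatedly replace the result list by all prefix+char*k extensions.
import Mathlib
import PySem

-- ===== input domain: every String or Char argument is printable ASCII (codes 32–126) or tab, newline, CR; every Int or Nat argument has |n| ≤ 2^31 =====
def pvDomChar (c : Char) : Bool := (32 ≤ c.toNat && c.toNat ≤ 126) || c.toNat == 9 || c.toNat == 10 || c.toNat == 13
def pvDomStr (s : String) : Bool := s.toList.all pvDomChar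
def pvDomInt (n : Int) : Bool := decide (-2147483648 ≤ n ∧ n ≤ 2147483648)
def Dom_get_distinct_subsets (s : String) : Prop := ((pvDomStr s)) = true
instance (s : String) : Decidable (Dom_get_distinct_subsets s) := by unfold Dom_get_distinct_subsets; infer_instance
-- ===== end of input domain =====

-- B replaces A's DFS recursion (exclude branch + pick-loop of include branches over a
-- mutated slate) by an iterative product over the (char,count) runs of sorted(s);
-- alternative decomposition, same asymptotic cost.


-- ===== PORT A =====
-- A's helper recursion over the index i of the sorted array is transcribed as the obvious
-- structural recursion over the remaining suffix s[i:]; the 'for pick in range(1,cnt+1)'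
-- loop that appends one copy of s[i] to the slate before each include call is the
-- flatMap over pick of the call with slate ++ pick copies (loop shape
-- PySem.List.foldl_append_eq_flatMap); the trailing pops only restore the slate.
def pvHelperA : List Char → List Char → List String
  | [], slate => [String.ofList slate]
  | c :: rest', slate =>
      let cnt := ((c :: rest').filter (fun j => j == c)).length
      let rest := (c :: rest').drop cnt
      pvHelperA rest slate ++
        (List.range' 1 cnt).flatMap (fun pick => pvHelperA rest (slate ++ List.replicate pick c))
  termination_by cs _ => cs.length
  decreasing_by all_goals (simp_all [List.filter]; try omega)

def get_distinct_subsets (s : String) : List String :=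
  pvHelperA (PySem.List.sorted s.toList (fun x => x) false) []

-- ===== PORT B =====
-- one step of B's run-building loop: merge into the last run or append a new one
def pvRunStep : List (Char × Nat) → Char → List (Char × Nat)
  | [], c => [(c, 1)]
  | [(c0, n)], c => if c0 == c then [(c0, n + 1)] else [(c0, n), (c, 1)]
  | r :: rs, c => r :: pvRunStep rs c

def get_distinct_subsets_alt (s : String) : List String :=
  let runs := (PySem.List.sorted s.toList (fun x => x) false).foldl pvRunStep []
  runs.foldl
    (fun res p =>
      res.flatMap (fun pre => (List.range (p.2 + 1)).map
        (fun k => pre ++ String.ofList (List.replicate k p.1)))) [""]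

-- ===== PRECONDITION & SPEC =====
def Spec_get_distinct_subsets (s : String) (out : List String) : Prop := out = get_distinct_subsets_alt s
instance (s : String) (out : List String) : Decidable (Spec_get_distinct_subsets s out) := by unfold Spec_get_distinct_subsets; infer_instance

-- ===== CLAIM (what is proved, stated in full; the proofs are below) =====
def Claim_equal_get_distinct_subsets : Prop := ∀ (s : String), Dom_get_distinct_subsets s → Spec_get_distinct_subsets s (get_distinct_subsets s)

-- ===== LEMMAS AND PROOFS =====

-- the maximal-run decomposition of a list of characters
def runsOf : List Char → List (Char × Nat)
  | [] => []
  | c :: rest => (c, (rest.takeWhile (fun j => j == c)).length + 1)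
      :: runsOf (rest.dropWhile (fun j => j == c))
  termination_by cs => cs.length
  decreasing_by simp; exact List.length_dropWhile_le _ _

-- the reference expansion of a run list (character lists, most significant run first)
def expandL : List (Char × Nat) → List (List Char)
  | [] => [[]]
  | (c, n) :: rs =>
      (List.range (n + 1)).flatMap (fun k => (expandL rs).map (fun t => List.replicate k c ++ t))

theorem pvRunStep_ne_nil (rs : List (Char × Nat)) (c : Char) : pvRunStep rs c ≠ [] := by
  induction rs with
  | nil => simp [pvRunStep]
  | cons r rs ih =>
    match rs with
    | [] => obtain ⟨c0, n⟩ := r; simp only [pvRunStep]; split <;> simp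
    | r' :: rs' => simp [pvRunStep]

theorem pvRunStep_cons (r0 : Char × Nat) (rs : List (Char × Nat)) (hrs : rs ≠ []) (c : Char) :
    pvRunStep (r0 :: rs) c = r0 :: pvRunStep rs c := by
  match rs with
  | [] => exact absurd rfl hrs
  | r' :: rs' => rfl

theorem foldl_pvRunStep_cons (cs : List Char) (r0 : Char × Nat) (rs : List (Char × Nat))
    (hrs : rs ≠ []) : cs.foldl pvRunStep (r0 :: rs) = r0 :: cs.foldl pvRunStep rs := by
  induction cs generalizing rs with
  | nil => rfl
  | cons c cs ih =>
    simp only [List.foldl_cons, pvRunStep_cons r0 rs hrs c]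
    exact ih _ (pvRunStep_ne_nil rs c)

theorem foldl_pvRunStep_single (cs : List Char) (c0 : Char) (n : Nat) :
    cs.foldl pvRunStep [(c0, n)]
      = (c0, n + (cs.takeWhile (fun j => j == c0)).length)
          :: runsOf (cs.dropWhile (fun j => j == c0)) := by
  induction cs generalizing c0 n with
  | nil => simp [runsOf]
  | cons c cs ih =>
    by_cases hc : c = c0
    · subst hc
      simp only [List.foldl_cons, pvRunStep, beq_self_eq_true, if_true,
        List.takeWhile_cons, List.dropWhile_cons]
      rw [ih]
      simp; omega
    · have hbc : (c0 == c) = false := by simp [bne_iff_ne]; exact fun h => hc h.symm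
      have hbc2 : (c == c0) = false := by simp [hc]
      simp only [List.foldl_cons, pvRunStep, hbc, Bool.false_eq_true, if_false]
      rw [foldl_pvRunStep_cons cs (c0, n) [(c, 1)] (by simp)]
      rw [ih]
      simp [runsOf, List.takeWhile_cons, List.dropWhile_cons, hbc2]
      omega

theorem filter_eq_takeWhile (c : Char) (l : List Char) (hge : ∀ y ∈ l, c ≤ y)
    (hp : l.Pairwise (· ≤ ·)) :
    l.filter (fun j => j == c) = l.takeWhile (fun j => j == c) := by
  induction l with
  | nil => rfl
  | cons x xs ih =>
    rcases List.pairwise_cons.mp hp with ⟨hx, hxs⟩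
    by_cases hxc : x = c
    · subst hxc
      simp only [List.filter_cons, List.takeWhile_cons, beq_self_eq_true, if_true]
      rw [ih (fun y hy => hge y (List.mem_cons_of_mem _ hy)) hxs]
    · have hcx : c < x := lt_of_le_of_ne (hge x List.mem_cons_self) (fun h => hxc h.symm)
      have hbe : (x == c) = false := by simp [hxc]
      simp only [List.filter_cons, List.takeWhile_cons, hbe, Bool.false_eq_true, if_false]
      rw [List.filter_eq_nil_iff.mpr]
      intro y hy
      have : c < y := lt_of_lt_of_le hcx (hx y hy)
      simp [ne_of_gt this]

theorem drop_takeWhile_length (p : Char → Bool) (l : List Char) :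
    l.drop ((l.takeWhile p).length) = l.dropWhile p := by
  induction l with
  | nil => rfl
  | cons x xs ih => by_cases h : p x <;> simp [List.dropWhile_cons, h, ih]

theorem flatMap_congr' {α β : Type} (l : List α) (f g : α → List β)
    (h : ∀ x ∈ l, f x = g x) : l.flatMap f = l.flatMap g := by
  induction l with
  | nil => rfl
  | cons x xs ih =>
    simp only [List.flatMap_cons, h x (List.mem_cons_self), ih (fun y hy => h y (List.mem_cons_of_mem _ hy))]

theorem lemA (cs : List Char) (slate : List Char) (h : cs.Pairwise (· ≤ ·)) :
    pvHelperA cs slate = (expandL (runsOf cs)).map (fun t => String.ofList (slate ++ t)) := by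
  induction cs, slate using pvHelperA.induct with
  | case1 slate => simp [pvHelperA, runsOf, expandL]
  | case2 c rest' slate cnt rest ih1 ih2 =>
    rcases List.pairwise_cons.mp h with ⟨hge, hp⟩
    have hfil : (c :: rest').filter (fun j => j == c)
        = c :: rest'.takeWhile (fun j => j == c) := by
      simp only [List.filter_cons, beq_self_eq_true, if_true]
      rw [filter_eq_takeWhile c rest' hge hp]
    have hcnt : cnt = (rest'.takeWhile (fun j => j == c)).length + 1 := by
      show ((c :: rest').filter (fun j => j == c)).length = _
      rw [hfil]; simp
    have hrest : rest = rest'.dropWhile (fun j => j == c) := by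
      show (c :: rest').drop cnt = _
      rw [hcnt]
      show rest'.drop ((rest'.takeWhile (fun j => j == c)).length) = _
      exact drop_takeWhile_length _ _
    have hrestp : rest.Pairwise (· ≤ ·) := by
      rw [hrest]; exact hp.sublist (List.dropWhile_sublist _)
    have hruns : runsOf (c :: rest') = (c, cnt) :: runsOf rest := by
      rw [hcnt, hrest]; simp [runsOf]
    rw [pvHelperA.eq_def]
    show pvHelperA rest slate ++
        (List.range' 1 cnt).flatMap (fun pick => pvHelperA rest (slate ++ List.replicate pick c))
      = _
    rw [ih1 hrestp, hruns, expandL]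
    have hr : List.range (cnt + 1) = 0 :: List.range' 1 cnt := by
      rw [List.range_eq_range', List.range'_succ]
    rw [hr]
    simp only [List.flatMap_cons, List.map_append, List.map_flatMap, List.map_map]
    congr 1
    apply flatMap_congr'
    intro pick hpick
    rw [ih2 pick hrestp]
    apply List.map_congr_left
    intro t _
    simp

theorem lemB2 (cs : List Char) : cs.foldl pvRunStep [] = runsOf cs := by
  match cs with
  | [] => simp [runsOf]
  | c :: cs =>
    show (c :: cs).foldl pvRunStep [] = runsOf (c :: cs)
    rw [show (c :: cs).foldl pvRunStep [] = cs.foldl pvRunStep [(c, 1)] from rfl,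
      foldl_pvRunStep_single, runsOf]
    simp; omega

theorem lemB3 (rs : List (Char × Nat)) (acc : List String) :
    rs.foldl
      (fun res p =>
        res.flatMap (fun pre => (List.range (p.2 + 1)).map
          (fun k => pre ++ String.ofList (List.replicate k p.1)))) acc
    = acc.flatMap (fun pre => (expandL rs).map (fun t => pre ++ String.ofList t)) := by
  induction rs generalizing acc with
  | nil => simp [expandL]
  | cons r rs ih =>
    obtain ⟨c, n⟩ := r
    rw [List.foldl_cons, ih, List.flatMap_assoc, expandL]
    apply flatMap_congr'
    intro pre _
    simp only [List.map_flatMap, List.flatMap_map, List.map_map]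
    apply flatMap_congr'
    intro k _
    apply List.map_congr_left
    intro t _
    simp [String.ofList_append, String.append_assoc]

-- ===== VERDICT (by name: the statement is the Claim_ definition above) =====
theorem get_distinct_subsets_spec : Claim_equal_get_distinct_subsets := by
  intro s _
  unfold Spec_get_distinct_subsets get_distinct_subsets get_distinct_subsets_alt
  rw [lemB2, lemB3, lemA _ _ (PySem.List.sorted_pairwise s.toList (fun x => x))]
  simp
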